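-- pv_equiv track=rewrite | github.com/nick-gravgaard/elastic-tabstops-py | elastictabstops/__init__.py | _sub_tabs
-- ===== SOURCE A (Python) =====
-- def _sub_tabs(line, tab_size, repl_char):
-- 	"""Return a line of text where tab characters have been substituted with the correct number of replacement chaaracters."""
--
-- 	str_list = []
-- 	pos = 0
-- 	for char in line:
-- 		if char == '\t':
-- 			expand = tab_size - (pos % tab_size)
-- 			str_list.append(expand * repl_char)
-- 			pos += expand
-- 		else:
-- 			str_list.append(char)
-- 			pos += 1
-- 	return ''.join(str_list)
-- ===== SOURCE B (Python) =====
-- def _sub_tabs(line, tab_size, repl_char):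
-- 	"""Expand tabs by whole runs: partition off each tab-free run in bulk instead of branching per character."""
-- 	out = []
-- 	pos = 0
-- 	rest = line
-- 	while rest:
-- 		head, tab, rest = rest.partition('\t')
-- 		out.append(head)
-- 		pos += len(head)
-- 		if tab:
-- 			expand = tab_size - pos % tab_size
-- 			out.append(expand * repl_char)
-- 			pos += expand
-- 	return ''.join(out)
-- ===== Notes on version B (the rewrite author's own statement) =====
-- stated objective: faster
-- what changed: B drops the per-character branch: it repeatedly partitions the remaining text at the next tab, emits the whole tab-free run with a single append and advances pos by its length, then expands the tab; A loops and branches once per character. Pre_ excludes only tab_size = 0 on lines containing a tab, where both programs raise ZeroDivisionError.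
import Mathlib
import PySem

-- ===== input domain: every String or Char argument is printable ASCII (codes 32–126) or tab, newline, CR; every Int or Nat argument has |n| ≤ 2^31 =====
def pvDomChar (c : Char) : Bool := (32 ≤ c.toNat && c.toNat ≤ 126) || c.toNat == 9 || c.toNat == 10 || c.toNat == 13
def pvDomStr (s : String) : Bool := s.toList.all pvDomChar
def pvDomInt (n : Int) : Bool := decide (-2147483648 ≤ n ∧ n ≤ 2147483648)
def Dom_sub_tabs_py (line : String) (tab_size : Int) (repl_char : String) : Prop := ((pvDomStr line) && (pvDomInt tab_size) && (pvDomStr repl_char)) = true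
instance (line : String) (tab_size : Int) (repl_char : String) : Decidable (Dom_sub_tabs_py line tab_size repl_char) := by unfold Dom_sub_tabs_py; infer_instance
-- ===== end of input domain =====

-- B partitions the remaining text at each tab and emits whole tab-free runs; A branches per character.
-- Equivalence is about the return value; neither program mutates its arguments.

-- ===== PORT A =====
-- loop body of A: state = (str_list as char-lists, pos)
def aStep (tab_size : Int) (repl : List Char) (s : List (List Char) × Int) (c : Char) : List (List Char) × Int :=
  if c = '\t' then
    let expand := tab_size - PySem.Int.mod s.2 tab_size
    (s.1 ++ [PySem.List.pyRepeat repl expand], s.2 + expand)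
  else (s.1 ++ [[c]], s.2 + 1)

def sub_tabs_py (line : String) (tab_size : Int) (repl_char : String) : String :=
  -- ''.join(str_list) = flatten of the collected pieces
  String.mk ((line.toList.foldl (aStep tab_size repl_char.toList) ([], 0)).1).flatten

-- ===== PORT B =====
-- hand port of rest.partition('\t') for the one-char separator: (before, sep-found?, after); exact
def chPartitionTab : List Char → List Char × Bool × List Char
  | [] => ([], false, [])
  | c :: rest =>
    if c = '\t' then ([], true, rest)
    else
      let p := chPartitionTab rest
      (c :: p.1, p.2.1, p.2.2)

-- termination of B's while loop: the 'after' part is strictly shorter when a tab was found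
theorem chPartitionTab_len : ∀ (cs : List Char), (chPartitionTab cs).2.1 = true →
    (chPartitionTab cs).2.2.length < cs.length := by
  intro cs
  induction cs with
  | nil => simp [chPartitionTab]
  | cons c rest ih =>
    by_cases hc : c = '\t'
    · simp [chPartitionTab, hc]
    · simp only [chPartitionTab, if_neg hc]
      intro h
      exact Nat.lt_succ_of_lt (ih h)

-- B's while loop: out/pos are the accumulators, rest the remaining text
def altGo (tab_size : Int) (repl : List Char) (out : List (List Char)) (pos : Int) (rest : List Char) : List (List Char) :=
  if h0 : rest = [] then out
  else
    let head := (chPartitionTab rest).1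
    if hf : (chPartitionTab rest).2.1 = true then
      let expand := tab_size - PySem.Int.mod (pos + head.length) tab_size
      altGo tab_size repl (out ++ [head, PySem.List.pyRepeat repl expand])
        (pos + head.length + expand) (chPartitionTab rest).2.2
    else out ++ [head]
termination_by rest.length
decreasing_by exact chPartitionTab_len rest hf

def sub_tabs_py_alt (line : String) (tab_size : Int) (repl_char : String) : String :=
  String.mk (altGo tab_size repl_char.toList [] 0 line.toList).flatten

-- ===== PRECONDITION & SPEC =====
-- Pre_ excludes exactly the inputs on which Python A raises (ZeroDivisionError from pos % 0):
-- tab_size = 0 with a tab character in the line.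
def Pre_sub_tabs_py (line : String) (tab_size : Int) (repl_char : String) : Prop :=
  tab_size ≠ 0 ∨ '\t' ∉ line.toList
instance (line : String) (tab_size : Int) (repl_char : String) : Decidable (Pre_sub_tabs_py line tab_size repl_char) := by unfold Pre_sub_tabs_py; infer_instance

def pvWitness_sub_tabs_py : String × Int × String := ("a\tbc\t\td", 4, " ")

def Spec_sub_tabs_py (line : String) (tab_size : Int) (repl_char : String) (out : String) : Prop := out = sub_tabs_py_alt line tab_size repl_char
instance (line : String) (tab_size : Int) (repl_char : String) (out : String) : Decidable (Spec_sub_tabs_py line tab_size repl_char out) := by unfold Spec_sub_tabs_py; infer_instance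

-- ===== CLAIM (what is proved, stated in full; the proofs are below) =====
def Claim_equal_sub_tabs_py : Prop := ∀ (line : String) (tab_size : Int) (repl_char : String), Dom_sub_tabs_py line tab_size repl_char → Pre_sub_tabs_py line tab_size repl_char → Spec_sub_tabs_py line tab_size repl_char (sub_tabs_py line tab_size repl_char)

-- ===== LEMMAS AND PROOFS =====

-- structure of partition: the head is tab-free; if a tab was found the input splits around it,
-- otherwise the head is the whole input and the tail is empty
theorem chPartitionTab_spec : ∀ (cs : List Char),
    '\t' ∉ (chPartitionTab cs).1 ∧
    (if (chPartitionTab cs).2.1 then cs = (chPartitionTab cs).1 ++ '\t' :: (chPartitionTab cs).2.2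
     else cs = (chPartitionTab cs).1 ∧ (chPartitionTab cs).2.2 = []) := by
  intro cs
  induction cs with
  | nil => simp [chPartitionTab]
  | cons c rest ih =>
    by_cases hc : c = '\t'
    · simp [chPartitionTab, hc]
    · simp only [chPartitionTab, if_neg hc]
      rcases ih with ⟨h1, h2⟩
      constructor
      · intro hmem
        rcases List.mem_cons.mp hmem with h | h
        · exact hc h.symm
        · exact h1 h
      · by_cases hf : (chPartitionTab rest).2.1 = true
        · simp only [hf, if_true] at h2 ⊢
          simpa using h2
        · simp only [Bool.not_eq_true] at hf
          simp only [hf, if_false] at h2 ⊢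
          simpa using h2

theorem flatten_map_singleton (l : List Char) : (l.map (fun c => [c])).flatten = l := by
  induction l with
  | nil => rfl
  | cons c t ih => simp [ih]

-- A's fold over a tab-free run appends the run's characters and advances pos by its length
theorem foldA_tabfree (ts : Int) (repl : List Char) :
    ∀ (h : List Char), '\t' ∉ h → ∀ (acc : List (List Char)) (pos : Int) (rest : List Char),
    (h ++ rest).foldl (aStep ts repl) (acc, pos) =
      rest.foldl (aStep ts repl) (acc ++ h.map (fun c => [c]), pos + h.length) := by
  intro h
  induction h with
  | nil => intro _ acc pos rest; simp
  | cons c t ih =>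
    intro hnotin acc pos rest
    have hc : c ≠ '\t' := fun hh => hnotin (by simp [hh])
    have ht : '\t' ∉ t := fun hh => hnotin (by simp [hh])
    simp only [List.cons_append, List.foldl_cons]
    rw [show aStep ts repl (acc, pos) c = (acc ++ [[c]], pos + 1) by simp [aStep, hc]]
    rw [ih ht]
    simp only [List.map_cons, List.length_cons]
    congr 2
    · simp
    · push_cast; ring

-- main invariant: A's fold and B's loop produce the same concatenation, by strong induction
-- on the length of the remaining text
theorem main_inv (ts : Int) (repl : List Char) :
    ∀ (n : Nat) (cs : List Char), cs.length ≤ n →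
    ∀ (acc out : List (List Char)) (pos : Int), acc.flatten = out.flatten →
    ((cs.foldl (aStep ts repl) (acc, pos)).1).flatten = (altGo ts repl out pos cs).flatten := by
  intro n
  induction n with
  | zero =>
    intro cs hlen acc out pos hao
    have : cs = [] := List.eq_nil_of_length_eq_zero (Nat.le_zero.mp hlen)
    subst this
    simpa [altGo] using hao
  | succ n ih =>
    intro cs hlen acc out pos hao
    by_cases h0 : cs = []
    · subst h0; simpa [altGo] using hao
    · obtain ⟨hhead, hsplit⟩ := chPartitionTab_spec cs
      by_cases hf : (chPartitionTab cs).2.1 = true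
      · -- a tab was found: cs = head ++ '\t' :: rest'
        rw [altGo]
        simp only [dif_neg h0, dif_pos hf]
        simp only [hf, if_true] at hsplit
        set hd := (chPartitionTab cs).1 with hhd
        set rs := (chPartitionTab cs).2.2 with hrs
        have hlt : rs.length < cs.length := chPartitionTab_len cs hf
        conv_lhs => rw [hsplit]
        rw [foldA_tabfree ts repl hd hhead]
        simp only [List.foldl_cons]
        rw [show aStep ts repl (acc ++ hd.map (fun c => [c]), pos + hd.length) '\t' =
            (acc ++ hd.map (fun c => [c]) ++ [PySem.List.pyRepeat repl (ts - PySem.Int.mod (pos + hd.length) ts)],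
             pos + hd.length + (ts - PySem.Int.mod (pos + hd.length) ts)) by simp [aStep]]
        apply ih rs (by omega)
        simp [hao, flatten_map_singleton]
      · -- no tab: cs itself is the head, the loop emits it and stops
        rw [altGo]
        simp only [dif_neg h0, dif_neg hf]
        simp only [Bool.not_eq_true] at hf
        simp only [hf, if_false] at hsplit
        rcases hsplit with ⟨hcs, _⟩
        conv_lhs => rw [hcs]
        have hfold := foldA_tabfree ts repl (chPartitionTab cs).1 hhead acc pos []
        simp only [List.append_nil, List.foldl_nil] at hfold
        rw [hfold]
        simp [hao, flatten_map_singleton]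

-- ===== VERDICT (by name: the statement is the Claim_ definition above) =====
theorem sub_tabs_py_spec : Claim_equal_sub_tabs_py := by
  intro line tab_size repl_char _ _
  unfold Spec_sub_tabs_py sub_tabs_py sub_tabs_py_alt
  congr 1
  exact main_inv tab_size repl_char.toList line.toList.length line.toList le_rfl [] [] 0 rfl
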